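-- pv_equiv track=rewrite | github.com/grimme-lab/ArchitectorWrapper | src/util.py | check_max_one_overlap
-- ===== SOURCE A (Python) =====
-- from collections import Counter
--
-- def check_max_one_overlap(list_a: list[str], list_b: list[str]) -> bool:
--     """
--     Check if at most one element from list_a appears in list_b, and appears only once.
--
--     Args:
--         list_a (list[str]): The first list to compare.
--         list_b (list[str]): The second list to compare.
--
--     Returns:
--         bool: True if at most one element from list_a appears in list_b and appears only once, otherwise False.
--     """
--
--     count = Counter(list_b)
--     overlap = set(list_a).intersection(set(list_b))
--
--     if len(overlap) > 1:
--         return False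
--
--     for item in overlap:
--         if count.get(item, 0) > 1:
--             return False
--
--     return True
-- ===== SOURCE B (Python) =====
-- def check_max_one_overlap(list_a: list[str], list_b: list[str]) -> bool:
--     """One streaming pass over list_b with early exit: return False as soon as
--     a second occurrence of any element of set(list_a) is seen."""
--     set_a = set(list_a)
--     seen = False
--     for x in list_b:
--         if x in set_a:
--             if seen:
--                 return False
--             seen = True
--     return True
-- ===== Notes on version B (the rewrite author's own statement) =====
-- stated objective: simpler
-- what changed: Replaced Counter + two set() constructions + intersection + a follow-up count loop by a single streaming pass over list_b with a boolean flag and early exit on the second shared occurrence.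
import Mathlib
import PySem

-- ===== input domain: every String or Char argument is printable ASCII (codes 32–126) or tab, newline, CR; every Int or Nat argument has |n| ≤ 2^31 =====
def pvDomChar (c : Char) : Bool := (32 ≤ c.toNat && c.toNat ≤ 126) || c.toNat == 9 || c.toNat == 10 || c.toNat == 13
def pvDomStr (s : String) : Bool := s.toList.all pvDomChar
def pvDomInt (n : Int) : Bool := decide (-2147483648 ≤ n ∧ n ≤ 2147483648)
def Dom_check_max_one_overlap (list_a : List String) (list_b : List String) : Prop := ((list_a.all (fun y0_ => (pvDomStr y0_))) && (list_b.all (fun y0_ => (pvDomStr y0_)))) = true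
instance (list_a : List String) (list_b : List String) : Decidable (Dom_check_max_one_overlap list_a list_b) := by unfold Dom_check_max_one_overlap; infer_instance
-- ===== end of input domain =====

-- B replaces A's Counter + set intersection + follow-up count loop by one streaming pass
-- over list_b with a boolean flag and early exit on a second shared occurrence (objective: simpler).


-- ===== PORT A =====
def check_max_one_overlap (list_a : List String) (list_b : List String) : Bool :=
  let count := PySem.Dict.counter list_b
  let overlap := PySem.Set.inter (PySem.Set.ofList list_a) (PySem.Set.ofList list_b)
  if overlap.length > 1 then false
  else if overlap.any (fun item => decide (1 < count.getD item 0)) then false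
  else true

-- ===== PORT B =====
-- the for-loop of Source B: walk list_b, flag the first shared element, early-exit on a second
def cmooLoop (set_a : PySem.Set String) (seen : Bool) : List String → Bool
  | [] => true
  | x :: rest =>
    if set_a.contains x then
      if seen then false else cmooLoop set_a true rest
    else cmooLoop set_a seen rest

def check_max_one_overlap_alt (list_a : List String) (list_b : List String) : Bool :=
  cmooLoop (PySem.Set.ofList list_a) false list_b

-- ===== PRECONDITION & SPEC =====
def Spec_check_max_one_overlap (list_a : List String) (list_b : List String) (out : Bool) : Prop := out = check_max_one_overlap_alt list_a list_b
instance (list_a : List String) (list_b : List String) (out : Bool) : Decidable (Spec_check_max_one_overlap list_a list_b out) := by unfold Spec_check_max_one_overlap; infer_instance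

-- ===== CLAIM (what is proved, stated in full; the proofs are below) =====
def Claim_equal_check_max_one_overlap : Prop := ∀ (list_a : List String) (list_b : List String), Dom_check_max_one_overlap list_a list_b → Spec_check_max_one_overlap list_a list_b (check_max_one_overlap list_a list_b)

-- ===== LEMMAS AND PROOFS =====

-- a list of length ≤ 1 has at most one member
lemma mem_le_one_eq {α} (l : List α) (v w : α) (h : l.length ≤ 1) (hv : v ∈ l) (hw : w ∈ l) : v = w := by
  match l with
  | [] => cases hv
  | [a] => simp at hv hw; rw [hv, hw]
  | a :: b :: t => simp at h

-- once the flag is set, B's loop succeeds iff no further element is shared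
lemma cmooLoop_true (sa : PySem.Set String) (bs : List String) :
    cmooLoop sa true bs = decide (bs.countP (fun x => decide (x ∈ sa)) = 0) := by
  induction bs with
  | nil => simp [cmooLoop]
  | cons x rest ih =>
    by_cases h : x ∈ sa <;>
      simp [cmooLoop, PySem.Set.contains, h, ih]

-- B's loop from a clear flag succeeds iff at most one element of bs is shared
lemma cmooLoop_false (sa : PySem.Set String) (bs : List String) :
    cmooLoop sa false bs = decide (bs.countP (fun x => decide (x ∈ sa)) ≤ 1) := by
  induction bs with
  | nil => simp [cmooLoop]
  | cons x rest ih =>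
    by_cases h : x ∈ sa <;>
      simp [cmooLoop, PySem.Set.contains, h, ih, cmooLoop_true]

-- A's Counter/intersection computation also decides "at most one shared occurrence in list_b"
lemma A_eq (list_a list_b : List String) :
    check_max_one_overlap list_a list_b
      = decide (list_b.countP (fun x => decide (x ∈ PySem.Set.ofList list_a)) ≤ 1) := by
  unfold check_max_one_overlap
  set sa := PySem.Set.ofList list_a with hsa
  have hmem : ∀ x, x ∈ PySem.Set.inter sa (PySem.Set.ofList list_b) ↔ x ∈ sa ∧ x ∈ list_b := by
    intro x
    simp [PySem.Set.inter, PySem.Set.contains, List.mem_filter, PySem.Set.mem_ofList]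
  have hnd : (PySem.Set.inter sa (PySem.Set.ofList list_b)).Nodup :=
    (PySem.Set.nodup_ofList list_a).filter _
  rcases hc : PySem.Set.inter sa (PySem.Set.ofList list_b) with _ | ⟨v, _ | ⟨w, t⟩⟩
  · -- empty overlap: nothing in list_b is shared
    rw [hc] at hmem
    have h0 : list_b.countP (fun x => decide (x ∈ sa)) = 0 := by
      rw [List.countP_eq_zero]
      intro x hx hmemx
      exact absurd ((hmem x).2 ⟨by simpa using hmemx, hx⟩) (List.not_mem_nil)
    simp [h0]
  · -- overlap = [v]: every shared element of list_b equals v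
    rw [hc] at hmem
    have hv := (hmem v).1 (by simp)
    have hpv : ∀ x ∈ list_b, (decide (x ∈ sa)) = (x == v) := by
      intro x hx
      by_cases hxv : x = v
      · subst hxv; simp [hv.1]
      · have : ¬ x ∈ sa := fun hmemx => hxv (by simpa using (hmem x).2 ⟨hmemx, hx⟩)
        simp [this, hxv]
    have hcnt : list_b.countP (fun x => decide (x ∈ sa)) = list_b.count v := by
      rw [List.count, List.countP_congr (fun x hx => by rw [hpv x hx])]
    simp only [List.length_cons, List.length_nil, List.any_cons, List.any_nil,
      PySem.Dict.getD_counter]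
    rw [hcnt]
    by_cases hgt : 1 < list_b.count v
    · simp [hgt]
    · simp [hgt]; omega
  · -- overlap has two distinct elements, each occurring in list_b
    rw [hc] at hmem hnd
    have hvw : v ≠ w := by
      intro h; subst h; simp at hnd
    have hv := (hmem v).1 (by simp)
    have hw := (hmem w).1 (by simp)
    have hge : ¬ (list_b.countP (fun x => decide (x ∈ sa)) ≤ 1) := by
      intro hle
      rw [List.countP_eq_length_filter] at hle
      exact hvw (mem_le_one_eq _ v w hle
        (List.mem_filter.2 ⟨hv.2, by simp [hv.1]⟩)
        (List.mem_filter.2 ⟨hw.2, by simp [hw.1]⟩))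
    simp [hge]

-- ===== VERDICT (by name: the statement is the Claim_ definition above) =====
theorem check_max_one_overlap_spec : Claim_equal_check_max_one_overlap := by
  intro list_a list_b _
  unfold Spec_check_max_one_overlap check_max_one_overlap_alt
  rw [A_eq, cmooLoop_false]
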